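-- pv_equiv track=rewrite | github.com/kkndbnn/main.py | main.py | shelf
-- ===== SOURCE A (Python) =====
-- def shelf(dir_2, number):
--     split = []
--     for dirs in dir_2.values():
--         split += dirs
--     if number in split:
--         for k, v in dir_2.items():
--             if number in v:
--                 return k
--
--                 break
--     else:
--         return 'Данного документу не существует'
-- ===== SOURCE B (Python) =====
-- def shelf(dir_2, number):
--     result = 'Данного документу не существует'
--     for k, v in reversed(list(dir_2.items())):
--         if number in v:
--             result = k
--     return result
-- ===== Notes on version B (the rewrite author's own statement) =====
-- stated objective: alternative
-- what changed: B drops A's flattened 'split' list, pre-membership test and early-return scan; instead it folds once over the items in reverse order with an accumulator initialised to the not-found string, overwriting it at every matching key, so the first match in dict order is the final value.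
import Mathlib
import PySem

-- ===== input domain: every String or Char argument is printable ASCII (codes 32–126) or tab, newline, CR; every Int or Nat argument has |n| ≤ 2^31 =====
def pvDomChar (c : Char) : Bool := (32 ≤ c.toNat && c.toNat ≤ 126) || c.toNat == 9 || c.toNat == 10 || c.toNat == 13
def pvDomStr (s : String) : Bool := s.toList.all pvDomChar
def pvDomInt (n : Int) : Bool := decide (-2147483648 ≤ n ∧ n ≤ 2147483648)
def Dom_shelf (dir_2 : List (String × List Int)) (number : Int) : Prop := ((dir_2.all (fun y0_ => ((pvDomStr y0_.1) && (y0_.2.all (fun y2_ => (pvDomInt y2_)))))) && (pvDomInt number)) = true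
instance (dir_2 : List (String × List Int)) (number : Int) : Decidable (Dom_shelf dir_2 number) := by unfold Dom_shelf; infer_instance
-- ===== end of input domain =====

-- B replaces A's build-flat-list-then-rescan-with-early-return by one reversed fold with an
-- overwrite accumulator (the first match in dict order survives as the last overwrite); objective: alternative.

-- ===== PORT A =====
-- the inner `for k, v in dir_2.items(): if number in v: return k` loop (none if it falls through; unreachable when number is in the flat list)
def shelfFind (dir_2 : List (String × List Int)) (number : Int) : Option String :=
  match dir_2 with
  | [] => none
  | (k, v) :: rest => if number ∈ v then some k else shelfFind rest number

def shelf (dir_2 : List (String × List Int)) (number : Int) : String :=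
  let split := dir_2.foldl (fun acc kv => acc ++ kv.2) []
  if number ∈ split then
    (shelfFind dir_2 number).getD ""   -- the none case is unreachable here (Python would return None)
  else
    "Данного документу не существует"

-- ===== PORT B =====
-- fold over the reversed item list, overwriting the accumulator at each matching key
def shelf_alt (dir_2 : List (String × List Int)) (number : Int) : String :=
  (dir_2.reverse).foldl
    (fun result kv => if number ∈ kv.2 then kv.1 else result)
    "Данного документу не существует"

-- ===== PRECONDITION & SPEC =====
def Spec_shelf (dir_2 : List (String × List Int)) (number : Int) (out : String) : Prop := out = shelf_alt dir_2 number
instance (dir_2 : List (String × List Int)) (number : Int) (out : String) : Decidable (Spec_shelf dir_2 number out) := by unfold Spec_shelf; infer_instance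

-- ===== CLAIM (what is proved, stated in full; the proofs are below) =====
def Claim_equal_shelf : Prop := ∀ (dir_2 : List (String × List Int)) (number : Int), Dom_shelf dir_2 number → Spec_shelf dir_2 number (shelf dir_2 number)

-- ===== LEMMAS AND PROOFS =====

theorem shelf_foldl_split (dir_2 : List (String × List Int)) (init : List Int) :
    dir_2.foldl (fun acc kv => acc ++ kv.2) init = init ++ dir_2.flatMap Prod.snd := by
  induction dir_2 generalizing init with
  | nil => simp
  | cons hd tl ih => simp [List.foldl, ih, List.append_assoc]

-- B's reversed overwrite-fold computes the first-match recursion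
theorem shelf_alt_eq_firstMatch (dir_2 : List (String × List Int)) (number : Int) :
    shelf_alt dir_2 number =
      (match dir_2 with
       | [] => "Данного документу не существует"
       | (k, v) :: rest => if number ∈ v then k else shelf_alt rest number) := by
  unfold shelf_alt
  rw [List.foldl_reverse]
  cases dir_2 with
  | nil => simp
  | cons hd tl =>
    obtain ⟨k, v⟩ := hd
    simp only [List.foldr_cons, List.foldl_reverse]

theorem shelf_eq_alt (dir_2 : List (String × List Int)) (number : Int) :
    shelf dir_2 number = shelf_alt dir_2 number := by
  induction dir_2 with
  | nil => simp [shelf, shelf_alt]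
  | cons hd tl ih =>
    obtain ⟨k, v⟩ := hd
    rw [shelf_alt_eq_firstMatch]
    have hm : ∀ (init : List Int), (number ∈ tl.foldl (fun acc kv => acc ++ kv.2) init) ↔ (number ∈ init ∨ number ∈ tl.flatMap Prod.snd) := by
      intro init; rw [shelf_foldl_split]; simp
    by_cases hv : number ∈ v
    · simp [shelf, shelfFind, hv]
    · have hc : (number ∈ List.foldl (fun acc kv => acc ++ kv.2) v tl) ↔ (number ∈ List.foldl (fun acc kv => acc ++ kv.2) ([] : List Int) tl) := by
        rw [hm, hm]; simp [hv]
      have hexp : shelf tl number = if number ∈ List.foldl (fun acc kv => acc ++ kv.2) ([] : List Int) tl then (shelfFind tl number).getD "" else "Данного документу не существует" := rfl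
      simp only [shelf, shelfFind, List.foldl, List.nil_append, if_neg hv]
      rw [if_congr hc rfl rfl, ← hexp]
      exact ih

-- ===== VERDICT (by name: the statement is the Claim_ definition above) =====
theorem shelf_spec : Claim_equal_shelf := by
  intro dir_2 number _
  unfold Spec_shelf
  exact shelf_eq_alt dir_2 number
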